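-- pv_equiv track=rewrite | github.com/ckoons/BubbleSpacetimeTheory | play/toy_1032_abc_bridge_exploration.py | smooth_content
-- ===== SOURCE A (Python) =====
-- def smooth_content(n, B=7):
--     """Return the B-smooth part of n (product of prime power factors with p ≤ B)."""
--     if n <= 1:
--         return 1
--     smooth = 1
--     for p in [2, 3, 5, 7]:
--         if p > B:
--             break
--         while n % p == 0:
--             smooth *= p
--             n //= p
--     return smooth
-- ===== SOURCE B (Python) =====
-- def _gcd(a, b):
--     while b:
--         a, b = b, a % b
--     return a
--
--
-- def smooth_content(n, B=7):
--     """Return the B-smooth part of n (product of prime power factors with p <= B)."""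
--     if n <= 1:
--         return 1
--     M = 1
--     for p in (2, 3, 5, 7):
--         if p <= B:
--             M *= p
--     smooth = 1
--     g = _gcd(n, M)
--     while g > 1:
--         smooth *= g
--         n //= g
--         g = _gcd(n, M)
--     return smooth
-- ===== Notes on version B (the rewrite author's own statement) =====
-- stated objective: alternative
-- what changed: B replaces the per-prime trial-division loops by a gcd-layer peeling loop: it builds M = product of the primes <= B and repeatedly multiplies in g = gcd(n, M) while dividing n by g, so each pass strips one factor of every relevant prime at once.
import Mathlib
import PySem

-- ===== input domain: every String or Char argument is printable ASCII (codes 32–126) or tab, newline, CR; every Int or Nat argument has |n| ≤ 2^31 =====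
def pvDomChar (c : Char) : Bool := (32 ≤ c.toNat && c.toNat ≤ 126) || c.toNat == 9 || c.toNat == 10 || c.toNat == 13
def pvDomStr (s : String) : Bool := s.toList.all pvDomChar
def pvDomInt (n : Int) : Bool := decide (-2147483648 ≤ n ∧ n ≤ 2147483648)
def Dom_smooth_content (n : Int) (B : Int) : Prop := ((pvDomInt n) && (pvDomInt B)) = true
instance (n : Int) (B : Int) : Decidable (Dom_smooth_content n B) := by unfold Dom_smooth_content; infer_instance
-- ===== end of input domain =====

-- B replaces A's per-prime trial-division loops by a gcd-layer peeling loop over M = product of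
-- the primes ≤ B; same return value everywhere (objective: alternative).

-- termination helper for the ports' division loops
theorem pvDivToNatLt (n p : Int) (hn : 0 < n) (hp : 1 < p) : (n / p).toNat < n.toNat := by
  have h1 : n = (n.toNat : Int) := (Int.toNat_of_nonneg (by omega)).symm
  have h2 : p = (p.toNat : Int) := (Int.toNat_of_nonneg (by omega)).symm
  rw [h1, h2, ← Int.natCast_div]
  have := Nat.div_lt_self (by omega : 0 < n.toNat) (by omega : 1 < p.toNat)
  omega

-- ===== PORT A =====
-- A's inner 'while n % p == 0: smooth *= p; n //= p'.
-- The dec-guard '0 < n ∧ 2 ≤ p' only totalizes the recursion; every reachable call has n ≥ 1, p ∈ [2,3,5,7].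
def pvStripA (p : Int) (n : Int) (smooth : Int) : Int × Int :=
  if h : 0 < n ∧ 2 ≤ p ∧ PySem.Int.mod n p = 0 then
    pvStripA p (PySem.Int.floordiv n p) (smooth * p)
  else (n, smooth)
termination_by n.toNat
decreasing_by
  obtain ⟨hn, hp, _⟩ := h
  rw [PySem.Int.floordiv_eq_ediv_of_pos (by omega)]
  exact pvDivToNatLt n p hn (by omega)

-- A's 'for p in [2, 3, 5, 7]: if p > B: break; <while loop>'.
def pvForA (B : Int) : List Int → Int → Int → Int
  | [], _, smooth => smooth
  | p :: ps, n, smooth =>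
    if p > B then smooth
    else
      let r := pvStripA p n smooth
      pvForA B ps r.1 r.2

def smooth_content (n : Int) (B : Int) : Int :=
  if n ≤ 1 then 1 else pvForA B [2, 3, 5, 7] n 1

-- ===== PORT B =====
-- Source B's _gcd: 'while b: a, b = b, a % b; return a'.  Dec-guard '0 ≤ b' totalizes; reachable calls have b ≥ 0.
def pvGcdB (a : Int) (b : Int) : Int :=
  if h : ¬ b = 0 ∧ 0 ≤ b then pvGcdB b (PySem.Int.mod a b) else a
termination_by b.toNat
decreasing_by
  obtain ⟨h0, h1⟩ := h
  rw [PySem.Int.mod_eq_emod_of_pos (by omega)]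
  have := Int.emod_lt_of_pos a (by omega : 0 < b)
  have := Int.emod_nonneg a h0
  omega

-- Source B's 'while g > 1: smooth *= g; n //= g; g = _gcd(n, M)'.  Dec-guard '0 < n' totalizes;
-- every reachable state has n ≥ 1 (g = gcd(n, M) divides n).
def pvPeelB (M : Int) (n : Int) (smooth : Int) : Int :=
  let g := pvGcdB n M
  if h : 1 < g ∧ 0 < n then pvPeelB M (PySem.Int.floordiv n g) (smooth * g)
  else smooth
termination_by n.toNat
decreasing_by
  obtain ⟨hg, hn⟩ := h
  rw [PySem.Int.floordiv_eq_ediv_of_pos (by omega)]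
  exact pvDivToNatLt n _ hn hg

def smooth_content_alt (n : Int) (B : Int) : Int :=
  if n ≤ 1 then 1
  else
    let M := [(2:Int), 3, 5, 7].foldl (fun M p => if p ≤ B then M * p else M) 1
    pvPeelB M n 1

-- ===== PRECONDITION & SPEC =====
def Spec_smooth_content (n : Int) (B : Int) (out : Int) : Prop := out = smooth_content_alt n B
instance (n : Int) (B : Int) (out : Int) : Decidable (Spec_smooth_content n B out) := by unfold Spec_smooth_content; infer_instance

-- ===== CLAIM (what is proved, stated in full; the proofs are below) =====
def Claim_equal_smooth_content : Prop := ∀ (n : Int) (B : Int), Dom_smooth_content n B → Spec_smooth_content n B (smooth_content n B)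

-- ===== LEMMAS AND PROOFS =====

-- Nat model of A's inner while loop: returns (n with all p's divided out, p^multiplicity).
def stripN (p n : Nat) : Nat × Nat :=
  if h : 1 < p ∧ 0 < n ∧ n % p = 0 then
    let r := stripN p (n / p)
    (r.1, p * r.2)
  else (n, 1)
termination_by n
decreasing_by exact Nat.div_lt_self h.2.1 h.1

-- Nat model of B's peeling loop.
def peelN (M n : Nat) : Nat :=
  let g := Nat.gcd n M
  if h : 1 < g ∧ 0 < n then g * peelN M (n / g)
  else 1
termination_by n
decreasing_by exact Nat.div_lt_self h.2 h.1

-- chained strips over a list of primes, shaped like A's outer loop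
def chainN (S : List Nat) (n : Nat) : Nat :=
  match S with
  | [] => 1
  | p :: T => (stripN p n).2 * chainN T (stripN p n).1

-- the common spec: product of p^(multiplicity of p in n) over a prime list
def specV (S : List Nat) (n : Nat) : Nat := (S.map (fun p => p ^ n.factorization p)).prod

theorem stripN_fst_pos (p n : Nat) : 0 < n → 0 < (stripN p n).1 := by
  induction n using stripN.induct p with
  | case1 x hx ih =>
    intro _
    rw [stripN, dif_pos hx]
    exact ih (Nat.div_pos (Nat.le_of_dvd hx.2.1 (Nat.dvd_of_mod_eq_zero hx.2.2)) (by omega))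
  | case2 x hx =>
    intro h0
    rw [stripN, dif_neg hx]
    exact h0

theorem stripN_spec (p n : Nat) (hp : p.Prime) : 0 < n →
    stripN p n = (n / p ^ n.factorization p, p ^ n.factorization p) := by
  induction n using stripN.induct p with
  | case1 x hx ih =>
    intro _
    obtain ⟨h1, h2, h3⟩ := hx
    have hdvd : p ∣ x := Nat.dvd_of_mod_eq_zero h3
    have hq : 0 < x / p := Nat.div_pos (Nat.le_of_dvd h2 hdvd) (by omega)
    have hk : 1 ≤ x.factorization p := (hp.dvd_iff_one_le_factorization (by omega)).mp hdvd
    have hfd : (x / p).factorization p = x.factorization p - 1 := by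
      rw [Nat.factorization_div hdvd]
      simp [hp.factorization_self]
    have hk' : x.factorization p - 1 + 1 = x.factorization p := by omega
    rw [stripN, dif_pos ⟨h1, h2, h3⟩]
    dsimp only
    rw [ih hq, hfd, Nat.div_div_eq_div_mul, ← pow_succ', hk']
  | case2 x hx =>
    intro h0
    have h3 : ¬ x % p = 0 := fun hc => hx ⟨hp.one_lt, h0, hc⟩
    have hnd : ¬ p ∣ x := fun hd => h3 (Nat.mod_eq_zero_of_dvd hd)
    rw [stripN, dif_neg hx, Nat.factorization_eq_zero_of_not_dvd hnd]
    simp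

theorem chainN_spec (S : List Nat) : ∀ n : Nat, (∀ p ∈ S, p.Prime) → S.Nodup → 0 < n →
    chainN S n = specV S n := by
  induction S with
  | nil => intro n _ _ _; simp [chainN, specV]
  | cons p T ih =>
    intro n hS hnd hn
    have hp : p.Prime := hS p (List.mem_cons_self)
    rw [chainN, stripN_spec p n hp hn]
    dsimp only
    have hc : 0 < n / p ^ n.factorization p := Nat.ordCompl_pos p (by omega)
    rw [ih _ (fun q hq => hS q (List.mem_cons_of_mem _ hq)) hnd.of_cons hc]
    have hVT : specV T (n / p ^ n.factorization p) = specV T n := by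
      unfold specV
      congr 1
      apply List.map_congr_left
      intro q hq
      have hqp : q ≠ p := fun hqp => (List.nodup_cons.mp hnd).1 (hqp ▸ hq)
      congr 1
      rw [Nat.factorization_ordCompl n p, Finsupp.erase_ne hqp]
    rw [hVT]
    simp [specV]

-- gcd distributes over a coprime product
theorem gcd_coprime_mul (x a b : Nat) (h : Nat.Coprime a b) :
    Nat.gcd x (a * b) = Nat.gcd x a * Nat.gcd x b := by
  apply Nat.dvd_antisymm
  · have hg : Nat.gcd x (a * b) ∣ a * b := Nat.gcd_dvd_right _ _
    have h1 : Nat.gcd x (a * b) ∣ Nat.gcd (Nat.gcd x (a * b)) a * Nat.gcd (Nat.gcd x (a * b)) b :=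
      Nat.dvd_gcd_mul_gcd_iff_dvd_mul.mpr hg
    have h2 : Nat.gcd (Nat.gcd x (a * b)) a ∣ Nat.gcd x a :=
      Nat.dvd_gcd ((Nat.gcd_dvd_left _ a).trans (Nat.gcd_dvd_left x (a * b))) (Nat.gcd_dvd_right _ a)
    have h3 : Nat.gcd (Nat.gcd x (a * b)) b ∣ Nat.gcd x b :=
      Nat.dvd_gcd ((Nat.gcd_dvd_left _ b).trans (Nat.gcd_dvd_left x (a * b))) (Nat.gcd_dvd_right _ b)
    exact h1.trans (mul_dvd_mul h2 h3)
  · have hco : (Nat.gcd x a).Coprime (Nat.gcd x b) := h.gcd_both x x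
    refine Nat.dvd_gcd ?_ ?_
    · exact hco.mul_dvd_of_dvd_of_dvd (Nat.gcd_dvd_left x a) (Nat.gcd_dvd_left x b)
    · exact mul_dvd_mul (Nat.gcd_dvd_right x a) (Nat.gcd_dvd_right x b)

theorem coprime_head_prod (p : Nat) (T : List Nat) (hp : p.Prime) (hT : ∀ q ∈ T, q.Prime)
    (hpT : p ∉ T) : Nat.Coprime p T.prod := by
  rw [Nat.coprime_list_prod_right_iff]
  intro q hq
  exact (Nat.coprime_primes hp (hT q hq)).mpr (fun hpq => hpT (hpq ▸ hq))

theorem primes_prod_pos (S : List Nat) (hS : ∀ p ∈ S, p.Prime) : 0 < S.prod := by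
  induction S with
  | nil => simp
  | cons p T ih =>
    rw [List.prod_cons]
    exact Nat.mul_pos (hS p (List.mem_cons_self)).pos
      (ih (fun q hq => hS q (List.mem_cons_of_mem _ hq)))

-- gcd with a product of distinct primes = product of those primes dividing n
theorem gcd_primes_prod (S : List Nat) (n : Nat) (hS : ∀ p ∈ S, p.Prime) (hnd : S.Nodup) :
    Nat.gcd n S.prod = (S.map (fun p => if p ∣ n then p else 1)).prod := by
  induction S with
  | nil => simp
  | cons p T ih =>
    have hp : p.Prime := hS p (List.mem_cons_self)
    have hT : ∀ q ∈ T, q.Prime := fun q hq => hS q (List.mem_cons_of_mem _ hq)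
    have hco : Nat.Coprime p T.prod :=
      coprime_head_prod p T hp hT (List.nodup_cons.mp hnd).1
    rw [List.prod_cons, gcd_coprime_mul n p T.prod hco, ih hT hnd.of_cons,
      List.map_cons, List.prod_cons]
    congr 1
    by_cases hd : p ∣ n
    · rw [if_pos hd, Nat.gcd_comm, Nat.gcd_eq_left hd]
    · rw [if_neg hd, Nat.gcd_comm]
      exact (Nat.Prime.coprime_iff_not_dvd hp).mpr hd

theorem primes_prod_factorization (S : List Nat) (hS : ∀ p ∈ S, p.Prime) (hnd : S.Nodup) :
    ∀ q ∈ S, S.prod.factorization q = 1 := by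
  induction S with
  | nil => simp
  | cons p T ih =>
    intro q hq
    have hp : p.Prime := hS p (List.mem_cons_self)
    have hT : ∀ r ∈ T, r.Prime := fun r hr => hS r (List.mem_cons_of_mem _ hr)
    have hTpos : T.prod ≠ 0 := (primes_prod_pos T hT).ne'
    rw [List.prod_cons, Nat.factorization_mul hp.ne_zero hTpos, Finsupp.add_apply]
    rcases List.mem_cons.mp hq with h | h
    · subst h
      have hqT : ¬ q ∣ T.prod := by
        intro hdvd
        have := (coprime_head_prod q T hp hT (List.nodup_cons.mp hnd).1).eq_one_of_dvd hdvd
        exact hp.one_lt.ne' this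
      rw [hp.factorization_self, Nat.factorization_eq_zero_of_not_dvd hqT]
    · have hqp : q ≠ p := fun hqp => (List.nodup_cons.mp hnd).1 (hqp ▸ h)
      have h1 : p.factorization q = 0 := by
        rw [hp.factorization, Finsupp.single_apply, if_neg (fun he => hqp he.symm)]
      rw [h1, ih hT hnd.of_cons q h]

-- one gcd layer peels exactly one factor of every relevant prime
theorem specV_peel (S : List Nat) (n : Nat) (hS : ∀ p ∈ S, p.Prime) (hnd : S.Nodup)
    (hn : 0 < n) :
    specV S n = Nat.gcd n S.prod * specV S (n / Nat.gcd n S.prod) := by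
  have hMpos : 0 < S.prod := primes_prod_pos S hS
  have hgdvd : Nat.gcd n S.prod ∣ n := Nat.gcd_dvd_left _ _
  have hpoint : ∀ p ∈ S,
      p ^ n.factorization p =
        (if p ∣ n then p else 1) * p ^ ((n / Nat.gcd n S.prod).factorization p) := by
    intro p hpS
    have hp : p.Prime := hS p hpS
    have hfg : (Nat.gcd n S.prod).factorization p = min (n.factorization p) 1 := by
      rw [Nat.factorization_gcd (by omega) (by omega), Finsupp.inf_apply,
        primes_prod_factorization S hS hnd p hpS]
    have hfd : (n / Nat.gcd n S.prod).factorization p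
        = n.factorization p - (Nat.gcd n S.prod).factorization p := by
      rw [Nat.factorization_div hgdvd]
      rfl
    by_cases hd : p ∣ n
    · have hk : 1 ≤ n.factorization p := (hp.dvd_iff_one_le_factorization (by omega)).mp hd
      rw [if_pos hd, hfd, hfg]
      have hmin : min (n.factorization p) 1 = 1 := by omega
      rw [hmin, ← pow_succ']
      congr 1
      omega
    · have hk : n.factorization p = 0 := Nat.factorization_eq_zero_of_not_dvd hd
      rw [if_neg hd, hfd, hfg, hk]
      simp
  unfold specV
  calc (S.map (fun p => p ^ n.factorization p)).prod
      = (S.map (fun p => (if p ∣ n then p else 1)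
          * p ^ ((n / Nat.gcd n S.prod).factorization p))).prod := by
        congr 1; exact List.map_congr_left hpoint
    _ = (S.map (fun p => if p ∣ n then p else 1)).prod
          * (S.map (fun p => p ^ ((n / Nat.gcd n S.prod).factorization p))).prod := by
        rw [← List.prod_map_mul]
    _ = Nat.gcd n S.prod
          * (S.map (fun p => p ^ ((n / Nat.gcd n S.prod).factorization p))).prod := by
        rw [gcd_primes_prod S n hS hnd]

theorem peelN_spec (S : List Nat) (hS : ∀ p ∈ S, p.Prime) (hnd : S.Nodup) :
    ∀ n : Nat, 0 < n → peelN S.prod n = specV S n := by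
  intro n
  induction n using Nat.strong_induction_on with
  | _ n ih =>
    intro hn
    by_cases hcond : 1 < Nat.gcd n S.prod
    · have hgdvd : Nat.gcd n S.prod ∣ n := Nat.gcd_dvd_left _ _
      have hq : 0 < n / Nat.gcd n S.prod :=
        Nat.div_pos (Nat.le_of_dvd hn hgdvd) (by omega)
      have hlt : n / Nat.gcd n S.prod < n := Nat.div_lt_self hn hcond
      rw [peelN, dif_pos ⟨hcond, hn⟩, ih _ hlt hq]
      exact (specV_peel S n hS hnd hn).symm
    · have hgpos : 0 < Nat.gcd n S.prod := Nat.gcd_pos_of_pos_left _ hn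
      have hg1 : Nat.gcd n S.prod = 1 := by omega
      rw [peelN, dif_neg (fun hc => hcond hc.1)]
      symm
      apply List.prod_eq_one
      intro x hx
      obtain ⟨p, hpS, rfl⟩ := List.mem_map.mp hx
      have hp : p.Prime := hS p hpS
      have hnd' : ¬ p ∣ n := by
        intro hd
        have hpM : p ∣ S.prod := List.dvd_prod hpS
        have : p ∣ Nat.gcd n S.prod := Nat.dvd_gcd hd hpM
        rw [hg1] at this
        exact hp.one_lt.ne' (Nat.eq_one_of_dvd_one this)
      rw [Nat.factorization_eq_zero_of_not_dvd hnd', pow_zero]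

-- ===== bridges: the Int ports compute the Nat models =====

theorem pvStripA_bridge (p : Nat) (hp : 2 ≤ p) : ∀ (n : Nat) (s : Int),
    pvStripA (p : Int) (n : Int) s = (((stripN p n).1 : Int), s * ((stripN p n).2 : Int)) := by
  intro n
  induction n using stripN.induct p with
  | case1 x hx ih =>
    intro s
    obtain ⟨h1, h2, h3⟩ := hx
    rw [stripN, dif_pos ⟨h1, h2, h3⟩]
    rw [pvStripA, dif_pos ⟨by exact_mod_cast h2, by exact_mod_cast hp, by
      rw [PySem.Int.mod_natCast, h3]; rfl⟩]
    rw [PySem.Int.floordiv_natCast, ih (s * (p : Int))]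
    dsimp only
    simp [mul_assoc]
  | case2 x hx =>
    intro s
    rw [stripN, dif_neg hx]
    rw [pvStripA, dif_neg (fun hc => hx ⟨by omega, by exact_mod_cast hc.1, by
      have := hc.2.2
      rw [PySem.Int.mod_natCast] at this
      exact_mod_cast this⟩)]
    simp

theorem pvGcdB_bridge : ∀ (b a : Nat), pvGcdB (a : Int) (b : Int) = (Nat.gcd a b : Int) := by
  intro b
  induction b using Nat.strong_induction_on with
  | _ b ih =>
    intro a
    by_cases hb : b = 0
    · subst hb
      rw [pvGcdB, dif_neg (by simp)]
      simp
    · rw [pvGcdB, dif_pos ⟨by exact_mod_cast hb, by positivity⟩]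
      rw [PySem.Int.mod_natCast, ih (a % b) (Nat.mod_lt a (by omega))]
      congr 1
      rw [Nat.gcd_comm b (a % b), ← Nat.gcd_rec b a, Nat.gcd_comm b a]

theorem pvPeelB_bridge (M : Nat) : ∀ (n : Nat), ∀ (s : Int),
    pvPeelB (M : Int) (n : Int) s = s * ((peelN M n : Nat) : Int) := by
  intro n
  induction n using Nat.strong_induction_on with
  | _ n ih =>
    intro s
    rw [pvPeelB, peelN]
    rw [pvGcdB_bridge M n]
    by_cases hc : 1 < Nat.gcd n M ∧ 0 < n
    · rw [dif_pos ⟨by exact_mod_cast hc.1, by exact_mod_cast hc.2⟩, dif_pos hc]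
      rw [PySem.Int.floordiv_natCast, ih _ (Nat.div_lt_self hc.2 hc.1) (s * _)]
      push_cast
      ring
    · rw [dif_neg (fun h => hc ⟨by exact_mod_cast h.1, by exact_mod_cast h.2⟩), dif_neg hc]
      simp

theorem pvForA_prefix (B : Int) : ∀ (S : List Nat) (rest : List Int) (n : Nat) (s : Int),
    (∀ p ∈ S, 2 ≤ p ∧ (p : Int) ≤ B) → (∀ q, rest.head? = some q → B < q) → 0 < n →
    pvForA B (S.map (fun p : Nat => (p : Int)) ++ rest) (n : Int) s
      = s * ((chainN S n : Nat) : Int) := by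
  intro S
  induction S with
  | nil =>
    intro rest n s _ hrest hn
    cases rest with
    | nil => simp [pvForA, chainN]
    | cons q rs =>
      have hq := hrest q rfl
      simp [pvForA, chainN, hq]
  | cons p T ih =>
    intro rest n s hS hrest hn
    have hp2 := (hS p (List.mem_cons_self)).1
    have hpB := (hS p (List.mem_cons_self)).2
    rw [List.map_cons, List.cons_append, pvForA, if_neg (by omega)]
    dsimp only
    rw [pvStripA_bridge p hp2 n s]
    rw [ih rest ((stripN p n).1) (s * ((stripN p n).2 : Int))
      (fun q hq => hS q (List.mem_cons_of_mem _ hq)) hrest (stripN_fst_pos p n hn)]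
    rw [chainN]
    push_cast
    ring

-- per-case assembly: A's loop over a kept prime prefix = B's peel with M = prefix product
theorem pvAssemble (B : Int) (m : Nat) (hm : 0 < m) (S : List Nat) (rest : List Int)
    (hSp : ∀ p ∈ S, p.Prime) (hnd : S.Nodup) (hS : ∀ p ∈ S, 2 ≤ p ∧ (p : Int) ≤ B)
    (hrest : ∀ q, rest.head? = some q → B < q) :
    pvForA B (S.map (fun p : Nat => (p : Int)) ++ rest) (m : Int) 1
      = pvPeelB ((S.prod : Nat) : Int) (m : Int) 1 := by
  rw [pvForA_prefix B S rest m 1 hS hrest hm, pvPeelB_bridge S.prod m 1]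
  rw [chainN_spec S m hSp hnd hm, peelN_spec S hSp hnd m hm]

-- ===== VERDICT (by name: the statement is the Claim_ definition above) =====
theorem smooth_content_spec : Claim_equal_smooth_content := by
  unfold Claim_equal_smooth_content Spec_smooth_content
  intro n B _
  unfold smooth_content smooth_content_alt
  by_cases hn : n ≤ 1
  · rw [if_pos hn, if_pos hn]
  · rw [if_neg hn, if_neg hn]
    dsimp only
    have hmn : n = ((n.toNat : Nat) : Int) := by omega
    have hm1 : 0 < n.toNat := by omega
    rw [hmn]
    by_cases h7 : 7 ≤ B
    · have he : ([2, 3, 5, 7] : List Int)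
          = (([2, 3, 5, 7] : List Nat).map (fun p : Nat => (p : Int))) ++ ([] : List Int) := by
        norm_num
      conv_lhs => rw [he]
      rw [pvAssemble B n.toNat hm1 [2, 3, 5, 7] [] (by decide) (by decide)
        (by intro p hp; fin_cases hp <;> refine ⟨by norm_num, ?_⟩ <;> push_cast <;> omega)
        (by intro q hq; simp at hq)]
      simp only [List.foldl]
      rw [if_pos (by omega : (2:Int) ≤ B), if_pos (by omega : (3:Int) ≤ B),
        if_pos (by omega : (5:Int) ≤ B), if_pos (by omega : (7:Int) ≤ B)]
      norm_num
    · by_cases h5 : 5 ≤ B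
      · have he : ([2, 3, 5, 7] : List Int)
            = (([2, 3, 5] : List Nat).map (fun p : Nat => (p : Int))) ++ ([(7 : Int)]) := by
          norm_num
        conv_lhs => rw [he]
        rw [pvAssemble B n.toNat hm1 [2, 3, 5] [(7 : Int)] (by decide) (by decide)
          (by intro p hp; fin_cases hp <;> refine ⟨by norm_num, ?_⟩ <;> push_cast <;> omega)
          (by intro q hq; simp at hq; omega)]
        simp only [List.foldl]
        rw [if_pos (by omega : (2:Int) ≤ B), if_pos (by omega : (3:Int) ≤ B),
          if_pos (by omega : (5:Int) ≤ B), if_neg (by omega : ¬ (7:Int) ≤ B)]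
        norm_num
      · by_cases h3 : 3 ≤ B
        · have he : ([2, 3, 5, 7] : List Int)
              = (([2, 3] : List Nat).map (fun p : Nat => (p : Int))) ++ ([(5 : Int), 7]) := by
            norm_num
          conv_lhs => rw [he]
          rw [pvAssemble B n.toNat hm1 [2, 3] [(5 : Int), 7] (by decide) (by decide)
            (by intro p hp; fin_cases hp <;> refine ⟨by norm_num, ?_⟩ <;> push_cast <;> omega)
            (by intro q hq; simp at hq; omega)]
          simp only [List.foldl]
          rw [if_pos (by omega : (2:Int) ≤ B), if_pos (by omega : (3:Int) ≤ B),
            if_neg (by omega : ¬ (5:Int) ≤ B), if_neg (by omega : ¬ (7:Int) ≤ B)]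
          norm_num
        · by_cases h2 : 2 ≤ B
          · have he : ([2, 3, 5, 7] : List Int)
                = (([2] : List Nat).map (fun p : Nat => (p : Int))) ++ ([(3 : Int), 5, 7]) := by
              norm_num
            conv_lhs => rw [he]
            rw [pvAssemble B n.toNat hm1 [2] [(3 : Int), 5, 7] (by decide) (by decide)
              (by intro p hp; fin_cases hp <;> refine ⟨by norm_num, ?_⟩ <;> push_cast <;> omega)
              (by intro q hq; simp at hq; omega)]
            simp only [List.foldl]
            rw [if_pos (by omega : (2:Int) ≤ B), if_neg (by omega : ¬ (3:Int) ≤ B),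
              if_neg (by omega : ¬ (5:Int) ≤ B), if_neg (by omega : ¬ (7:Int) ≤ B)]
            norm_num
          · have he : ([2, 3, 5, 7] : List Int)
                = (([] : List Nat).map (fun p : Nat => (p : Int))) ++ ([(2 : Int), 3, 5, 7]) := by
              norm_num
            conv_lhs => rw [he]
            rw [pvAssemble B n.toNat hm1 [] [(2 : Int), 3, 5, 7] (by simp) (by simp)
              (by simp)
              (by intro q hq; simp at hq; omega)]
            simp only [List.foldl]
            rw [if_neg (by omega : ¬ (2:Int) ≤ B), if_neg (by omega : ¬ (3:Int) ≤ B),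
              if_neg (by omega : ¬ (5:Int) ≤ B), if_neg (by omega : ¬ (7:Int) ≤ B)]
            norm_num
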